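-- pv_equiv track=rewrite | github.com/NunoMarquesRM/Python-ReverseTwoStrings | reverse2strings.py | InvertedMerge
-- ===== SOURCE A (Python) =====
-- def invertedArray(str):
--     tmp = []
--     index = len(str)
--     while( index > 0 ):
--         tmp += str[ index - 1]
--         index -= 1
--     return tmp
--
-- def InvertedMerge(str1, str2):
--     tmpStr1 = invertedArray(str1)
--     tmpStr2 = invertedArray(str2)
--     maximo = 0
--
--     if(len(tmpStr1) > len(tmpStr2)):
--         maximo = len(tmpStr1)
--     else:
--         maximo = len(tmpStr2)
--
--     i = 0
--     final = ""
--     while( i < maximo ):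
--         if(i < len(tmpStr1)):
--             final += tmpStr1[i]
--         if(i < len(tmpStr2)):
--             final += tmpStr2[i]
--         i+=1
--     return final
-- ===== SOURCE B (Python) =====
-- def InvertedMerge(str1, str2):
--     r1, r2 = str1[::-1], str2[::-1]
--     n = min(len(r1), len(r2))
--     return ''.join(a + b for a, b in zip(r1, r2)) + r1[n:] + r2[n:]
-- ===== Notes on version B (the rewrite author's own statement) =====
-- stated objective: idiomatic
-- what changed: Replaces the hand-rolled reversal loop and the index-counting merge loop (per-index bounds checks, repeated string +=) by slice reversal, a zip-based pairwise interleave joined once, and slicing off the leftover tail.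
import Mathlib
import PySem

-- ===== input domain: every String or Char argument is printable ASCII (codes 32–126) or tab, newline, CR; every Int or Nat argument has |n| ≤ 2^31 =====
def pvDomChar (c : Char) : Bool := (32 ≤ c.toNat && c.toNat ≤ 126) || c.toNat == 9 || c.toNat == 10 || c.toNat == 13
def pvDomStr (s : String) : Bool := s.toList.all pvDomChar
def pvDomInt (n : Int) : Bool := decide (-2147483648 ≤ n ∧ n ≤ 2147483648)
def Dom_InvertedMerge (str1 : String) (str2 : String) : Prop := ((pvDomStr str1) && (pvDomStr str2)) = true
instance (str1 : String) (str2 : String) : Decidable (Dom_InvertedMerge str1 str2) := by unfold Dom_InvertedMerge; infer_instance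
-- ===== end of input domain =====

-- B replaces A's hand-rolled reversal loop and index-counting merge loop (with per-index
-- bounds checks) by slice reversal, a zip-based interleave and slicing off the tail (idiomatic).

-- ===== PORT A =====
-- invertedArray's while loop: index counts down, tmp += str[index-1]
-- (index-1 is always in range, so the in-range access str[index-1] is ported as getD)
def pvInvALoop (s : List Char) : Nat → List Char → List Char
  | 0, tmp => tmp
  | n + 1, tmp => pvInvALoop s n (tmp ++ [s.getD n ' '])

def pvInvertedArray (s : List Char) : List Char := pvInvALoop s s.length []

-- the merge while loop: state (i, final), fuel = maximo - i iterations remain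
def pvMergeLoop (l1 l2 : List Char) : Nat → Nat → List Char → List Char
  | _, 0, final => final
  | i, rem + 1, final =>
      pvMergeLoop l1 l2 (i + 1) rem
        (final ++ (if i < l1.length then [l1.getD i ' '] else [])
               ++ (if i < l2.length then [l2.getD i ' '] else []))

def InvertedMerge (str1 : String) (str2 : String) : String :=
  let tmpStr1 := pvInvertedArray str1.toList
  let tmpStr2 := pvInvertedArray str2.toList
  let maximo := if tmpStr1.length > tmpStr2.length then tmpStr1.length else tmpStr2.length
  String.ofList (pvMergeLoop tmpStr1 tmpStr2 0 maximo [])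

-- ===== PORT B =====
def InvertedMerge_alt (str1 : String) (str2 : String) : String :=
  let r1 := ((PySem.Str.slice? str1 none none (-1)).getD "").toList   -- str1[::-1]
  let r2 := ((PySem.Str.slice? str2 none none (-1)).getD "").toList   -- str2[::-1]
  let n := min r1.length r2.length
  String.ofList (((r1.zip r2).flatMap fun p => [p.1, p.2]) ++ r1.drop n ++ r2.drop n)

-- ===== PRECONDITION & SPEC =====
def Spec_InvertedMerge (str1 : String) (str2 : String) (out : String) : Prop := out = InvertedMerge_alt str1 str2
instance (str1 : String) (str2 : String) (out : String) : Decidable (Spec_InvertedMerge str1 str2 out) := by unfold Spec_InvertedMerge; infer_instance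

-- ===== CLAIM (what is proved, stated in full; the proofs are below) =====
def Claim_equal_InvertedMerge : Prop := ∀ (str1 : String) (str2 : String), Dom_InvertedMerge str1 str2 → Spec_InvertedMerge str1 str2 (InvertedMerge str1 str2)

-- ===== LEMMAS AND PROOFS =====

-- canonical interleave, middleman between the two ports
def pvInter : List Char → List Char → List Char
  | [], ys => ys
  | x :: xs, [] => x :: xs
  | x :: xs, y :: ys => x :: y :: pvInter xs ys

theorem pvInter_nil_right (xs : List Char) : pvInter xs [] = xs := by
  cases xs <;> rfl

theorem pvInvALoop_eq (s : List Char) : ∀ (n : Nat), n ≤ s.length →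
    ∀ (tmp : List Char), pvInvALoop s n tmp = tmp ++ (s.take n).reverse := by
  intro n
  induction n with
  | zero => intro _ tmp; simp [pvInvALoop]
  | succ k ih =>
      intro hn tmp
      have hk : k < s.length := by omega
      rw [pvInvALoop, ih (by omega)]
      simp only [List.getD_eq_getElem?_getD, List.getElem?_eq_getElem hk, Option.getD_some]
      rw [show (List.take (k+1) s) = (List.take k s).concat s[k] from (List.take_concat_get ..).symm]
      simp only [List.concat_eq_append, List.reverse_append, List.reverse_cons,
        List.reverse_nil, List.nil_append, List.append_assoc, List.cons_append]

theorem pvInvertedArray_eq (s : List Char) : pvInvertedArray s = s.reverse := by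
  rw [pvInvertedArray, pvInvALoop_eq s s.length le_rfl]
  simp

theorem pvMergeLoop_eq (l1 l2 : List Char) : ∀ (rem i : Nat),
    rem = max l1.length l2.length - i →
    ∀ (final : List Char),
      pvMergeLoop l1 l2 i rem final = final ++ pvInter (l1.drop i) (l2.drop i) := by
  intro rem
  induction rem with
  | zero =>
      intro i h final
      have h1 : l1.length ≤ i := by omega
      have h2 : l2.length ≤ i := by omega
      simp [pvMergeLoop, List.drop_eq_nil_of_le h1, List.drop_eq_nil_of_le h2, pvInter]
  | succ k ih =>
      intro i h final
      rw [pvMergeLoop, ih (i + 1) (by omega)]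
      rw [List.append_assoc, List.append_assoc]
      congr 1
      by_cases h1 : i < l1.length <;> by_cases h2 : i < l2.length
      · rw [List.drop_eq_getElem_cons h1, List.drop_eq_getElem_cons h2]
        simp [pvInter, List.getD_eq_getElem?_getD, h1, h2]
      · rw [List.drop_eq_getElem_cons h1, List.drop_eq_nil_of_le (show l2.length ≤ i by omega),
            List.drop_eq_nil_of_le (show l2.length ≤ i + 1 by omega)]
        simp [pvInter, List.getD_eq_getElem?_getD, h1, h2]
        rw [pvInter_nil_right, ← List.drop_eq_getElem_cons h1]
      · rw [List.drop_eq_getElem_cons h2, List.drop_eq_nil_of_le (show l1.length ≤ i by omega),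
            List.drop_eq_nil_of_le (show l1.length ≤ i + 1 by omega)]
        simp [pvInter, List.getD_eq_getElem?_getD, h1, h2]
      · omega

theorem pvZip_eq_pvInter : ∀ (xs ys : List Char),
    ((xs.zip ys).flatMap fun p => [p.1, p.2]) ++ xs.drop (min xs.length ys.length)
        ++ ys.drop (min xs.length ys.length) = pvInter xs ys := by
  intro xs
  induction xs with
  | nil => intro ys; cases ys <;> simp [pvInter]
  | cons x xs ih =>
      intro ys
      cases ys with
      | nil => simp [pvInter]
      | cons y ys =>
          have hih := ih ys
          simp only [List.append_assoc] at hih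
          simp only [List.zip_cons_cons, List.flatMap_cons, List.length_cons,
            Nat.succ_min_succ, List.drop_succ_cons, pvInter, List.cons_append,
            List.nil_append, List.append_assoc]
          rw [hih]

-- ===== VERDICT (by name: the statement is the Claim_ definition above) =====
theorem InvertedMerge_spec : Claim_equal_InvertedMerge := by
  intro str1 str2 _
  unfold Spec_InvertedMerge InvertedMerge InvertedMerge_alt
  simp only [PySem.Str.slice?_none_none_neg_one, Option.getD_some, String.toList_ofList]
  rw [pvInvertedArray_eq, pvInvertedArray_eq]
  rw [pvMergeLoop_eq _ _ _ 0
    (by simp only [gt_iff_lt, Nat.sub_zero, Nat.max_def]; split <;> split <;> omega)]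
  simp only [List.drop_zero, List.nil_append]
  rw [← pvZip_eq_pvInter]
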